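-- pv_equiv track=rewrite | github.com/CaglarAlperen/METU-Homeworks | 462-AI/Hw2/hw2.py | UCSeight
-- ===== SOURCE A (Python) =====
-- actions = ["LEFT", "UP", "RIGHT", "DOWN"]
--
-- class Node:
--     def __init__(self, state, previous, depth, path_cost, heuristic, last_action):
--         self.state = state
--         self.previous = previous
--         self.depth = depth
--         self.path_cost = path_cost
--         self.heuristic = heuristic
--         self.f = path_cost + heuristic
--         self.last_action = last_action
--
-- def swap(string, index1, index2):
--     l = list(string)
--     (l[index1], l[index2]) = (l[index2], l[index1])
--     return ''.join(l)
--
-- def ValidEight(action, state):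
--     index = state.find(' ')
--     if action == "LEFT":
--         return index % 3 != 0
--     elif action == "UP":
--         return index > 2
--     elif action == "RIGHT":
--         return index % 3 != 2
--     elif action == "DOWN":
--         return index < 6
--
-- def Solution(node, processed, action_name = False):
--     path = []
--     depth = node.depth
--     path_cost = node.path_cost
--
--     while node is not None:
--         if action_name:
--             if node.last_action is not None:
--                 path.insert(0, node.last_action)
--         else:
--             path.insert(0, node.state)
--         node = node.previous
--     return (path, processed, depth, path_cost)
--
-- def insertSortedUCS(fringe, node):
--     for i in range(len(fringe)):
--         if node.path_cost < fringe[i].path_cost: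
--             fringe.insert(i, node)
--             return fringe
--     else:
--         fringe.append(node)
--         return fringe
--
-- def nextStateEight(action, state):
--     index = state.find(' ')
--     if action == "LEFT":
--         state = swap(state, index, index-1)
--     elif action == "UP":
--         state = swap(state, index, index-3)
--     elif action == "RIGHT":
--         state = swap(state, index, index+1)
--     elif action == "DOWN":
--         state = swap(state, index, index+3)
--     return state
--
-- def UCSeight(start, target):
--     fringe = [Node(start, None, 0, 0, 0, None)]
--     processed = []
--     closed = set()
--
--     while len(fringe) > 0:
--         node = fringe.pop(0)
--
--         if node.state == target:
--             processed.append(node.state)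
--             return Solution(node, processed, True)
--
--         if node.state not in closed:
--             processed.append(node.state)
--             closed.add(node.state)
--             for action in actions:
--                 if ValidEight(action, node.state):
--                     fringe = insertSortedUCS(fringe, Node(nextStateEight(action, node.state), node, node.depth+1, node.path_cost+1, 0, action))
--     return None
-- ===== SOURCE B (Python) =====
-- from collections import deque
--
-- actions = ["LEFT", "UP", "RIGHT", "DOWN"]
--
-- def swap(string, index1, index2):
--     l = list(string)
--     (l[index1], l[index2]) = (l[index2], l[index1])
--     return ''.join(l)
--
-- def ValidEight(action, state):
--     index = state.find(' ')
--     if action == "LEFT":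
--         return index % 3 != 0
--     elif action == "UP":
--         return index > 2
--     elif action == "RIGHT":
--         return index % 3 != 2
--     elif action == "DOWN":
--         return index < 6
--
-- def nextStateEight(action, state):
--     index = state.find(' ')
--     if action == "LEFT":
--         state = swap(state, index, index-1)
--     elif action == "UP":
--         state = swap(state, index, index-3)
--     elif action == "RIGHT":
--         state = swap(state, index, index+1)
--     elif action == "DOWN":
--         state = swap(state, index, index+3)
--     return state
--
-- def UCSeight(start, target):
--     # All moves cost 1 and ties are broken FIFO, so the sorted fringe is a
--     # plain queue: breadth-first search with a deque, carrying each node's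
--     # action path forward instead of a parent-pointer chain.
--     queue = deque([(start, [])])
--     processed = []
--     closed = set()
--     while queue:
--         state, path = queue.popleft()
--         if state == target:
--             processed.append(state)
--             return (path, processed, len(path), len(path))
--         if state not in closed:
--             processed.append(state)
--             closed.add(state)
--             for action in actions:
--                 if ValidEight(action, state):
--                     queue.append((nextStateEight(action, state), path + [action]))
--     return None
-- ===== Notes on version B (the rewrite author's own statement) =====
-- stated objective: alternative
-- what changed: Since every move costs 1 and insertSortedUCS breaks ties FIFO, the sorted-list uniform-cost fringe is replaced by a plain FIFO queue (collections.deque) that carries each node's action path forward, so the sorted insertion scan and the Node parent-pointer chain walk disappear.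
-- outside the precondition, e.g. on UCSeight('aaaaaaaaaaa ', 'xxxxxxxxxxxx'): A returns None, B returns None
import Mathlib
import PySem

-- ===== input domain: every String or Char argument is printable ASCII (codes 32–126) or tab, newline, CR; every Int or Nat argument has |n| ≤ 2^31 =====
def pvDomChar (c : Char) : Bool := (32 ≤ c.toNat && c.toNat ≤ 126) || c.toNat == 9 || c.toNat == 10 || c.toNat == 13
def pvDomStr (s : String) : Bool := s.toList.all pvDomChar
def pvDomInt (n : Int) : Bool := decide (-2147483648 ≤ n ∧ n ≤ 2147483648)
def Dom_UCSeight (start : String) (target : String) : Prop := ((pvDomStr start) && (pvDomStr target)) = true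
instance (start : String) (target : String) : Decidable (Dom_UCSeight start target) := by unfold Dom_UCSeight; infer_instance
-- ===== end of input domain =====

-- B replaces A's sorted-list uniform-cost fringe and parent-pointer Node chain by a plain
-- FIFO queue carrying each node's action path forward (all moves cost 1 and ties are FIFO,
-- so the uniform-cost search degenerates to breadth-first search); same return value.

-- ===== PORT A =====
-- shared module helpers (identical source in Source A and Source B): actions, swap, ValidEight, nextStateEight
def pvActions : List String := ["LEFT", "UP", "RIGHT", "DOWN"]

-- l[i] = c with a possibly negative index: Python normalises i to len+i; exact for
-- indices already checked in range by pyGet? below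
def pvSetChar (l : List Char) (i : Int) (c : Char) : List Char :=
  if i < 0 then l.set ((l.length : Int) + i).toNat c else l.set i.toNat c

-- swap(string, index1, index2); none = IndexError (excluded by Pre_)
def pvSwap (s : String) (i j : Int) : Option String :=
  match PySem.List.pyGet? s.toList i, PySem.List.pyGet? s.toList j with
  | some a, some b => some (String.ofList (pvSetChar (pvSetChar s.toList i b) j a))
  | _, _ => none

def pvValidEight (action : String) (state : String) : Bool :=
  let index := PySem.Str.find state " "
  if action = "LEFT" then PySem.Int.mod index 3 != 0
  else if action = "UP" then decide (2 < index)
  else if action = "RIGHT" then PySem.Int.mod index 3 != 2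
  else if action = "DOWN" then decide (index < 6)
  else false  -- Python falls through returning None; unreachable (action ∈ pvActions)

-- nextStateEight; none = IndexError inside swap (excluded by Pre_)
def pvNextStateEight? (action : String) (state : String) : Option String :=
  let index := PySem.Str.find state " "
  if action = "LEFT" then pvSwap state index (index - 1)
  else if action = "UP" then pvSwap state index (index - 3)
  else if action = "RIGHT" then pvSwap state index (index + 1)
  else if action = "DOWN" then pvSwap state index (index + 3)
  else some state

-- A's Node(state, previous, depth, path_cost, heuristic, last_action); previous : Node|None
-- is inlined into the two constructors (nested Option is not allowed); f = path_cost + heuristic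
inductive ANode where
  | root (state : String) (depth pathCost heuristic f : Int) (lastAction : Option String)
  | node (state : String) (previous : ANode) (depth pathCost heuristic f : Int) (lastAction : Option String)

def ANode.state : ANode → String
  | .root s _ _ _ _ _ => s
  | .node s _ _ _ _ _ _ => s

def ANode.depth : ANode → Int
  | .root _ d _ _ _ _ => d
  | .node _ _ d _ _ _ _ => d

def ANode.pathCost : ANode → Int
  | .root _ _ c _ _ _ => c
  | .node _ _ _ c _ _ _ => c

def pvMkRoot (s : String) (d c h : Int) (la : Option String) : ANode :=
  .root s d c h (c + h) la

def pvMkChild (s : String) (prev : ANode) (d c h : Int) (la : Option String) : ANode :=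
  .node s prev d c h (c + h) la

-- the while-loop of Solution: walk the previous chain, prepending at index 0
def pvSolutionWalk (actionName : Bool) : ANode → List String → List String
  | .root s _ _ _ _ la, path =>
      if actionName then (match la with | some a => a :: path | none => path) else s :: path
  | .node s prev _ _ _ _ la, path =>
      pvSolutionWalk actionName prev
        (if actionName then (match la with | some a => a :: path | none => path) else s :: path)

def pvSolution (node : ANode) (processed : List String) (actionName : Bool) :
    List String × List String × Int × Int :=
  (pvSolutionWalk actionName node [], processed, node.depth, node.pathCost)

def pvInsertSortedUCS (fringe : List ANode) (node : ANode) : List ANode :=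
  match fringe with
  | [] => [node]
  | x :: xs => if node.pathCost < x.pathCost then node :: x :: xs else x :: pvInsertSortedUCS xs node

def pvStepA (node : ANode) (fr : List ANode) (action : String) : List ANode :=
  if pvValidEight action node.state then
    match pvNextStateEight? action node.state with
    | some s' => pvInsertSortedUCS fr
        (pvMkChild s' node (node.depth + 1) (node.pathCost + 1) 0 (some action))
    | none => fr  -- IndexError in Python; outside Pre_ (totalisation guard)
  else fr

def pvExpandA (node : ANode) (fringe : List ANode) : List ANode :=
  pvActions.foldl (pvStepA node) fringe

def pvLoopA (target : String) :
    Nat → List ANode → List String → PySem.Set String →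
    Option (List String × List String × Int × Int)
  | 0, _, _, _ => none  -- fuel guard (totalisation only; never reached inside Pre_)
  | _ + 1, [], _, _ => none
  | fuel + 1, node :: rest, processed, closed =>
      if node.state = target then some (pvSolution node (processed ++ [node.state]) true)
      else if PySem.Set.contains closed node.state = false then
        pvLoopA target fuel (pvExpandA node rest) (processed ++ [node.state])
          (PySem.Set.add closed node.state)
      else pvLoopA target fuel rest processed closed

def UCSeight (start : String) (target : String) : Option (List String × List String × Int × Int) :=
  pvLoopA target 10000000 [pvMkRoot start 0 0 0 none] [] PySem.Set.empty

-- ===== PORT B =====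
def pvStepB (state : String) (path : List String) (q : List (String × List String))
    (action : String) : List (String × List String) :=
  if pvValidEight action state then
    match pvNextStateEight? action state with
    | some s' => q ++ [(s', path ++ [action])]
    | none => q  -- IndexError in Python; outside Pre_ (totalisation guard)
  else q

def pvExpandB (state : String) (path : List String) (queue : List (String × List String)) :
    List (String × List String) :=
  pvActions.foldl (pvStepB state path) queue

def pvLoopB (target : String) :
    Nat → List (String × List String) → List String → PySem.Set String →
    Option (List String × List String × Int × Int)
  | 0, _, _, _ => none  -- fuel guard (totalisation only)
  | _ + 1, [], _, _ => none
  | fuel + 1, (state, path) :: rest, processed, closed =>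
      if state = target then
        some (path, processed ++ [state], (path.length : Int), (path.length : Int))
      else if PySem.Set.contains closed state = false then
        pvLoopB target fuel (pvExpandB state path rest) (processed ++ [state])
          (PySem.Set.add closed state)
      else pvLoopB target fuel rest processed closed

def UCSeight_alt (start : String) (target : String) : Option (List String × List String × Int × Int) :=
  pvLoopB target 10000000 [(start, [])] [] PySem.Set.empty

-- ===== PRECONDITION & SPEC =====
-- Pre_ excludes the inputs where a move of the blank (or Python's -1 'not found' index)
-- indexes off the string and A raises IndexError: admitted are start = target (immediate
-- return), space-free starts of length ≥ 3 (the index stays -1, both swaps in range), and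
-- 9-character starts containing a space (the board case: every move stays in 0..8).
-- This also excludes some returning inputs (space-bearing starts of length ≠ 9 whose
-- blank never leaves range), on which both programs return the same value.
def Pre_UCSeight (start : String) (target : String) : Prop :=
  start = target ∨
  (PySem.Str.isIn " " start = false ∧ 3 ≤ PySem.Str.len start) ∨
  (PySem.Str.isIn " " start = true ∧ PySem.Str.len start = 9)

instance (start : String) (target : String) : Decidable (Pre_UCSeight start target) := by
  unfold Pre_UCSeight; infer_instance

def pvWitness_UCSeight : String × String := ("1234567 8", "12345678 ")

def Spec_UCSeight (start : String) (target : String)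
    (out : Option (List String × List String × Int × Int)) : Prop :=
  out = UCSeight_alt start target

instance (start : String) (target : String) (out : Option (List String × List String × Int × Int)) :
    Decidable (Spec_UCSeight start target out) := by unfold Spec_UCSeight; infer_instance

-- ===== CLAIM (what is proved, stated in full; the proofs are below) =====
def Claim_equal_UCSeight : Prop := ∀ (start : String) (target : String),
  Dom_UCSeight start target → Pre_UCSeight start target →
  Spec_UCSeight start target (UCSeight start target)

-- ===== LEMMAS AND PROOFS =====

-- the action path recorded along a Node's previous-chain (what Solution(…, True) returns)
def pvChain : ANode → List String
  | .root _ _ _ _ _ la => (match la with | some a => [a] | none => [])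
  | .node _ prev _ _ _ _ la => pvChain prev ++ (match la with | some a => [a] | none => [])

-- B's queue entry corresponding to an A-fringe node
def pvAbs (n : ANode) : String × List String := (n.state, pvChain n)

-- bookkeeping A maintains redundantly: depth = path_cost = length of the action path
def pvWF (n : ANode) : Prop := n.depth = n.pathCost ∧ n.pathCost = ((pvChain n).length : Int)

theorem pvSolutionWalk_true (n : ANode) :
    ∀ p, pvSolutionWalk true n p = pvChain n ++ p := by
  induction n with
  | root s d c h f la => intro p; cases la <;> simp [pvSolutionWalk, pvChain]
  | node s prev d c h f la ih =>
      intro p; cases la <;> simp [pvSolutionWalk, pvChain, ih]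

theorem pvInsertSorted_append (fr : List ANode) (n : ANode)
    (h : ∀ x ∈ fr, ¬ n.pathCost < x.pathCost) :
    pvInsertSortedUCS fr n = fr ++ [n] := by
  induction fr with
  | nil => rfl
  | cons x xs ih =>
      simp only [pvInsertSortedUCS]
      rw [if_neg (h x (by simp))]
      simp [ih (fun y hy => h y (by simp [hy]))]

theorem pvExpand_core (node : ANode) (hwf : pvWF node) :
    ∀ (acts : List String) (fr : List ANode),
    (∀ x ∈ fr, x.pathCost ≤ node.pathCost + 1) →
    ∃ ks : List ANode,
      acts.foldl (pvStepA node) fr = fr ++ ks ∧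
      acts.foldl (pvStepB node.state (pvChain node)) (fr.map pvAbs) = fr.map pvAbs ++ ks.map pvAbs ∧
      (∀ x ∈ ks, x.pathCost = node.pathCost + 1 ∧ pvWF x) := by
  intro acts
  induction acts with
  | nil => intro fr _; exact ⟨[], by simp⟩
  | cons a rest ih =>
      intro fr hfr
      simp only [List.foldl_cons]
      by_cases hv : pvValidEight a node.state = true
      · simp only [pvStepA, pvStepB, hv, if_pos]
        cases hnx : pvNextStateEight? a node.state with
        | none => exact ih fr hfr
        | some s' =>
            dsimp only
            set child := pvMkChild s' node (node.depth + 1) (node.pathCost + 1) 0 (some a) with hc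
            have hcost : child.pathCost = node.pathCost + 1 := by
              simp [hc, pvMkChild, ANode.pathCost]
            have hins : pvInsertSortedUCS fr child = fr ++ [child] := by
              apply pvInsertSorted_append
              intro x hx
              have := hfr x hx
              omega
            rw [hins]
            have hchain : pvChain child = pvChain node ++ [a] := rfl
            have hwfc : pvWF child := by
              refine ⟨?_, ?_⟩
              · show node.depth + 1 = node.pathCost + 1
                rw [hwf.1]
              · show node.pathCost + 1 = ((pvChain child).length : Int)
                rw [hchain, hwf.2]
                simp
            have hbound : ∀ x ∈ fr ++ [child], x.pathCost ≤ node.pathCost + 1 := by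
              intro x hx
              rcases List.mem_append.mp hx with h | h
              · exact hfr x h
              · simp at h; subst h; omega
            obtain ⟨ks, h1, h2, h3⟩ := ih (fr ++ [child]) hbound
            refine ⟨child :: ks, ?_, ?_, ?_⟩
            · simpa using h1
            · have habs : pvAbs child = (s', pvChain node ++ [a]) := by
                show (child.state, pvChain child) = _
                rw [hchain]; rfl
              simpa [habs] using h2
            · intro x hx
              rcases List.mem_cons.mp hx with h | h
              · subst h; exact ⟨hcost, hwfc⟩
              · exact h3 x h
      · have hv' : pvValidEight a node.state = false := by
          simpa using hv
        simp only [pvStepA, pvStepB, hv', Bool.false_eq_true, if_false]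
        exact ih fr hfr

theorem pvLoop_eq (target : String) :
    ∀ (fuel : Nat) (fr : List ANode) (processed : List String) (closed : PySem.Set String),
    fr.Pairwise (fun a b => a.pathCost ≤ b.pathCost) →
    (∀ h ∈ fr.head?, ∀ x ∈ fr, x.pathCost ≤ h.pathCost + 1) →
    (∀ x ∈ fr, pvWF x) →
    pvLoopA target fuel fr processed closed = pvLoopB target fuel (fr.map pvAbs) processed closed := by
  intro fuel
  induction fuel with
  | zero => intro fr _ _ _ _ _; simp [pvLoopA, pvLoopB]
  | succ fuel ih =>
      intro fr processed closed hpw hhd hwf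
      cases fr with
      | nil => simp [pvLoopA, pvLoopB]
      | cons node rest =>
          have hwfn : pvWF node := hwf node (by simp)
          simp only [List.map_cons, pvAbs, pvLoopA, pvLoopB]
          by_cases hgoal : node.state = target
          · rw [if_pos hgoal, if_pos hgoal]
            simp only [pvSolution, pvSolutionWalk_true, List.append_nil]
            rw [hwfn.1, hwfn.2]
          · rw [if_neg hgoal, if_neg hgoal]
            by_cases hcl : PySem.Set.contains closed node.state = false
            · rw [if_pos hcl, if_pos hcl]
              obtain ⟨ks, h1, h2, h3⟩ :=
                pvExpand_core node hwfn pvActions rest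
                  (fun x hx => hhd node (by simp) x (by simp [hx]))
              have hrw : pvExpandA node rest = rest ++ ks := h1
              have hrwB : pvExpandB node.state (pvChain node) (rest.map pvAbs)
                  = rest.map pvAbs ++ ks.map pvAbs := h2
              rw [hrw, hrwB, ← List.map_append]
              apply ih
              · rw [List.pairwise_append]
                refine ⟨List.Pairwise.of_cons hpw, ?_, ?_⟩
                · apply List.pairwise_iff_forall_sublist.mpr
                  intro a b hsub
                  have ha : a ∈ ks := hsub.subset (by simp)
                  have hb : b ∈ ks := hsub.subset (by simp)
                  have := (h3 a ha).1
                  have := (h3 b hb).1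
                  omega
                · intro a ha b hb
                  have h1a := hhd node (by simp) a (by simp [ha])
                  have := (h3 b hb).1
                  omega
              · intro h hh x hx
                have hxm : x ∈ rest ++ ks := hx
                have hhm : h ∈ rest ++ ks := by
                  cases hrk : rest ++ ks with
                  | nil => simp [hrk] at hh
                  | cons y ys => simp [hrk] at hh; simp [hh]
                have hub : ∀ z ∈ rest ++ ks, z.pathCost ≤ node.pathCost + 1 := by
                  intro z hz
                  rcases List.mem_append.mp hz with h' | h'
                  · exact hhd node (by simp) z (by simp [h'])
                  · exact le_of_eq (h3 z h').1
                have hlb : node.pathCost ≤ h.pathCost := by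
                  rcases List.mem_append.mp hhm with h' | h'
                  · exact (List.pairwise_cons.mp hpw).1 h h'
                  · have := (h3 h h').1; omega
                have := hub x hxm
                omega
              · intro x hx
                rcases List.mem_append.mp hx with h' | h'
                · exact hwf x (by simp [h'])
                · exact (h3 x h').2
            · rw [if_neg hcl, if_neg hcl]
              apply ih
              · exact List.Pairwise.of_cons hpw
              · intro h hh x hx
                have hhm : h ∈ rest := List.mem_of_mem_head? hh
                have hlb : node.pathCost ≤ h.pathCost := (List.pairwise_cons.mp hpw).1 h hhm
                have := hhd node (by simp) x (by simp [hx])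
                omega
              · intro x hx; exact hwf x (by simp [hx])

-- ===== VERDICT (by name: the statement is the Claim_ definition above) =====
theorem UCSeight_spec : Claim_equal_UCSeight := by
  intro start target _ _
  unfold Spec_UCSeight UCSeight UCSeight_alt
  have h := pvLoop_eq target 10000000 [pvMkRoot start 0 0 0 none] [] PySem.Set.empty
    (by simp) (by intro h hh x hx; simp at hh hx; subst hh; subst hx; omega)
    (by intro x hx; simp at hx; subst hx
        exact ⟨rfl, by simp [pvMkRoot, pvChain, ANode.pathCost]⟩)
  simpa [pvAbs, pvMkRoot, ANode.state, pvChain] using h
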